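-- pv_equiv track=rewrite | github.com/rozelie/pyretrosheet | pyretrosheet/load.py | _iter_game_lines
-- ===== SOURCE A (Python) =====
-- from collections.abc import Iterator
-- from copy import deepcopy
--
-- def _iter_game_lines(lines: list[str]) -> Iterator[list[str]]:
--     """Iterate the lines corresponding to each game in a Retrosheet play-by-play file.
--
--     Args:
--         lines: lines of a play-by-play file (includes multiple games in a single file)
--     """
--     current_game_lines: list[str] = []
--     for line in lines:
--         if line.startswith("id,") and current_game_lines:
--             yield deepcopy(current_game_lines)
--             current_game_lines.clear()
--
--         current_game_lines.append(line)
--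
--     if current_game_lines:
--         yield deepcopy(current_game_lines)
-- ===== SOURCE B (Python) =====
-- def _iter_game_lines(lines):
--     """Iterate the lines corresponding to each game in a Retrosheet play-by-play file.
--
--     Computes the game boundary indices first, then yields fresh slices.
--     """
--     n = len(lines)
--     starts = [i for i, line in enumerate(lines) if i > 0 and line.startswith("id,")]
--     bounds = [0] + starts + [n]
--     for a, b in zip(bounds, bounds[1:]):
--         if a < b:
--             yield lines[a:b]
-- ===== Notes on version B (the rewrite author's own statement) =====
-- stated objective: alternative
-- what changed: Replaces the incremental accumulate/deepcopy/clear loop by first computing the list of game boundary indices (positions of 'id,' lines after index 0), then slicing the input between consecutive boundaries.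
import Mathlib
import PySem

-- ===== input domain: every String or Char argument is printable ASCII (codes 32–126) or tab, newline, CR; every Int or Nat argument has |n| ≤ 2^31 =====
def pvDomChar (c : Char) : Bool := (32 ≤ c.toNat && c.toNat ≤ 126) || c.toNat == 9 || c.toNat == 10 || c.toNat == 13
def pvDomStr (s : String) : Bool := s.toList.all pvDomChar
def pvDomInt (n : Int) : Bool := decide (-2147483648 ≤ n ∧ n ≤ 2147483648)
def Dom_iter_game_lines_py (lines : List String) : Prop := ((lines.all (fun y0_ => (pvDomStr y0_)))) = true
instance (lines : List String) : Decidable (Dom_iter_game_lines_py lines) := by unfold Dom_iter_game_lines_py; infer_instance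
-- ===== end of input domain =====

-- B replaces A's incremental accumulate/yield/clear loop by computing the game
-- boundary indices first and slicing between consecutive boundaries (objective: alternative decomposition).

-- ===== PORT A =====
-- loop of A: `cur` is current_game_lines, yields collected into the result list
def iterGameLinesLoop : List String → List String → List (List String)
  | cur, [] => if cur.isEmpty then [] else [cur]
  | cur, l :: ls =>
    if PySem.Str.startswith l "id," && !cur.isEmpty then
      cur :: iterGameLinesLoop [l] ls
    else
      iterGameLinesLoop (cur ++ [l]) ls

def iter_game_lines_py (lines : List String) : List (List String) :=
  iterGameLinesLoop [] lines

-- ===== PORT B =====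
def iter_game_lines_py_alt (lines : List String) : List (List String) :=
  let n : Int := lines.length
  let starts : List Int :=
    ((PySem.List.enumerate lines 0).filter
      (fun p => decide (0 < p.1) && PySem.Str.startswith p.2 "id,")).map Prod.fst
  let bounds : List Int := 0 :: (starts ++ [n])
  (bounds.zip bounds.tail).filterMap
    (fun p => if p.1 < p.2 then some (PySem.List.slice lines (some p.1) (some p.2)) else none)

-- ===== PRECONDITION & SPEC =====
def Spec_iter_game_lines_py (lines : List String) (out : List (List String)) : Prop := out = iter_game_lines_py_alt lines
instance (lines : List String) (out : List (List String)) : Decidable (Spec_iter_game_lines_py lines out) := by unfold Spec_iter_game_lines_py; infer_instance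

-- ===== CLAIM (what is proved, stated in full; the proofs are below) =====
def Claim_equal_iter_game_lines_py : Prop := ∀ (lines : List String), Dom_iter_game_lines_py lines → Spec_iter_game_lines_py lines (iter_game_lines_py lines)

-- ===== LEMMAS AND PROOFS =====

def notId (s : String) : Bool := !PySem.Str.startswith s "id,"

-- reference function: both ports equal this
def chunk : List String → List (List String)
  | [] => []
  | l :: ls =>
    (l :: ls.takeWhile notId) :: chunk (ls.dropWhile notId)
termination_by xs => xs.length
decreasing_by
  simp only [List.length_cons]
  exact Nat.lt_succ_of_le (List.length_dropWhile_le _ _)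

-- ---- A = chunk ----
theorem aLoop_eq_chunk (ls : List String) : ∀ cur : List String, cur ≠ [] →
    iterGameLinesLoop cur ls = (cur ++ ls.takeWhile notId) :: chunk (ls.dropWhile notId) := by
  induction ls with
  | nil =>
    intro cur h
    simp [iterGameLinesLoop, chunk, List.isEmpty_iff, h]
  | cons l ls ih =>
    intro cur h
    have hne : cur.isEmpty = false := by simp [h]
    by_cases hp : PySem.Str.startswith l "id," = true
    · have hn : notId l = false := by unfold notId; rw [hp]; rfl
      have step : iterGameLinesLoop cur (l :: ls) = cur :: iterGameLinesLoop [l] ls := by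
        simp only [iterGameLinesLoop, hp, hne, Bool.not_false, Bool.and_self, reduceIte]
      rw [step, ih [l] (by simp), List.takeWhile_cons, List.dropWhile_cons, hn]
      simp only [Bool.false_eq_true, reduceIte]
      rw [show chunk (l :: ls) = (l :: ls.takeWhile notId) :: chunk (ls.dropWhile notId) from by
        rw [chunk]]
      simp
    · have hp' : PySem.Str.startswith l "id," = false := eq_false_of_ne_true hp
      have hn : notId l = true := by unfold notId; rw [hp']; rfl
      have step : iterGameLinesLoop cur (l :: ls) = iterGameLinesLoop (cur ++ [l]) ls := by
        simp only [iterGameLinesLoop, hp', Bool.false_and]; simp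
      rw [step, ih (cur ++ [l]) (by simp), List.takeWhile_cons, List.dropWhile_cons, hn]
      simp

theorem a_eq_chunk (lines : List String) : iter_game_lines_py lines = chunk lines := by
  cases lines with
  | nil => simp [iter_game_lines_py, iterGameLinesLoop, chunk]
  | cons l ls =>
    have step : iter_game_lines_py (l :: ls) = iterGameLinesLoop [l] ls := by
      simp only [iter_game_lines_py, iterGameLinesLoop, List.isEmpty_nil, Bool.not_true,
        Bool.and_false, List.nil_append]; simp
    rw [step, aLoop_eq_chunk ls [l] (by simp),
      show chunk (l :: ls) = (l :: ls.takeWhile notId) :: chunk (ls.dropWhile notId) from by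
        rw [chunk]]
    simp

-- ---- B = chunk ----
def gTest (p : Int × String) : Bool := decide (0 < p.1) && PySem.Str.startswith p.2 "id,"
def startsOf (xs : List String) : List Int := ((PySem.List.enumerate xs 0).filter gTest).map Prod.fst
def boundsOf (xs : List String) : List Int := 0 :: (startsOf xs ++ [(xs.length : Int)])
def sliceF (xs : List String) (p : Int × Int) : Option (List String) :=
  if p.1 < p.2 then some (PySem.List.slice xs (some p.1) (some p.2)) else none

theorem alt_def (lines : List String) :
    iter_game_lines_py_alt lines
      = ((boundsOf lines).zip (boundsOf lines).tail).filterMap (sliceF lines) := rfl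

theorem filter_shift (xs : List String) : ∀ (s t : Int), 1 ≤ s → 1 ≤ s + t →
    ((PySem.List.enumerate xs (s+t)).filter gTest).map Prod.fst
      = (((PySem.List.enumerate xs s).filter gTest).map Prod.fst).map (· + t) := by
  induction xs with
  | nil => intro s t _ _; simp [PySem.List.enumerate_nil]
  | cons x xs ih =>
    intro s t hs hst
    have hg1 : gTest (s + t, x) = PySem.Str.startswith x "id," := by
      unfold gTest
      rw [decide_eq_true (show (0:Int) < s + t by omega), Bool.true_and]
    have hg2 : gTest (s, x) = PySem.Str.startswith x "id," := by
      unfold gTest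
      rw [decide_eq_true (show (0:Int) < s by omega), Bool.true_and]
    rw [PySem.List.enumerate_cons, PySem.List.enumerate_cons, List.filter_cons,
      List.filter_cons, hg1, hg2, show s + t + 1 = (s + 1) + t by ring]
    cases hx : PySem.Str.startswith x "id," with
    | true =>
      rw [if_pos rfl, if_pos rfl, List.map_cons, List.map_cons,
        ih (s+1) t (by omega) (by omega), List.map_cons]
    | false =>
      rw [if_neg (by simp), if_neg (by simp), ih (s+1) t (by omega) (by omega)]

theorem filter_no_id (pre : List String) : ∀ (s : Int),
    (∀ x ∈ pre, PySem.Str.startswith x "id," = false) →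
    ((PySem.List.enumerate pre s).filter gTest) = [] := by
  induction pre with
  | nil => intro s _; simp [PySem.List.enumerate_nil]
  | cons x xs ih =>
    intro s h
    have hg : gTest (s, x) = false := by
      unfold gTest; rw [h x (by simp), Bool.and_false]
    rw [PySem.List.enumerate_cons, List.filter_cons, hg, if_neg (by simp)]
    exact ih (s+1) (fun y hy => h y (by simp [hy]))

theorem mem_starts_nonneg (xs : List String) (a : Int) (h : a ∈ startsOf xs) : 0 ≤ a := by
  simp only [startsOf, List.mem_map] at h
  obtain ⟨p, hp, rfl⟩ := h
  have := List.mem_filter.mp hp |>.1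
  rw [PySem.List.mem_enumerate_iff] at this
  obtain ⟨k, _, rfl⟩ := this
  simp

theorem mem_bounds_nonneg (xs : List String) (a : Int) (h : a ∈ boundsOf xs) : 0 ≤ a := by
  simp only [boundsOf, List.mem_cons, List.mem_append] at h
  rcases h with rfl | h | h
  · exact le_refl 0
  · exact mem_starts_nonneg xs a h
  · rcases h with rfl | h
    · positivity
    · simp at h

theorem slice_shift (c rest : List String) (a b : Int) (ha : 0 ≤ a) (hb : 0 ≤ b) :
    PySem.List.slice (c ++ rest) (some (a + c.length)) (some (b + c.length))
      = PySem.List.slice rest (some a) (some b) := by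
  rw [PySem.List.slice_toNat, PySem.List.slice_toNat]
  · have h1 : (a + (c.length : Int)).toNat = a.toNat + c.length := by omega
    have h2 : (b + (c.length : Int)).toNat = b.toNat + c.length := by omega
    rw [h1, h2]
    have h3 : (c ++ rest).drop (a.toNat + c.length) = rest.drop a.toNat := by
      rw [List.drop_append, List.drop_eq_nil_of_le (by omega), List.nil_append]
      congr 1
      omega
    rw [h3]
    congr 1
    omega
  all_goals omega

theorem dropWhile_head_false {p : String → Bool} {l l' : List String} {x : String}
    (h : l.dropWhile p = x :: l') : p x = false := by
  induction l with
  | nil => simp at h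
  | cons y ys ih =>
    rw [List.dropWhile_cons] at h
    by_cases hy : p y = true
    · rw [if_pos hy] at h; exact ih h
    · rw [if_neg hy] at h
      cases h
      exact eq_false_of_ne_true hy

theorem starts_cons (l : String) (ls : List String) :
    startsOf (l :: ls) = ((PySem.List.enumerate ls 1).filter gTest).map Prod.fst := by
  unfold startsOf
  rw [PySem.List.enumerate_cons, List.filter_cons,
    show gTest (0, l) = false from by unfold gTest; rfl, if_neg (by simp),
    show (0:Int) + 1 = 1 from by norm_num]

theorem b_eq_chunk (lines : List String) : iter_game_lines_py_alt lines = chunk lines := by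
  induction lines using chunk.induct with
  | case1 => rw [show chunk ([] : List String) = [] from by rw [chunk]]; rfl
  | case2 l ls ih =>
    have hsplit : ls.takeWhile notId ++ ls.dropWhile notId = ls := List.takeWhile_append_dropWhile
    set pre := ls.takeWhile notId with hpre_def
    set rest := ls.dropWhile notId with hrest_def
    have hpre : ∀ x ∈ pre, PySem.Str.startswith x "id," = false := by
      intro x hx
      have := List.mem_takeWhile_imp hx
      unfold notId at this
      simpa using this
    have hstarts : startsOf (l :: ls)
        = ((PySem.List.enumerate rest (1 + (pre.length : Int))).filter gTest).map Prod.fst := by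
      rw [starts_cons, ← hsplit, PySem.List.enumerate_append, List.filter_append,
        filter_no_id pre 1 hpre, List.nil_append]
    have hchunk : chunk (l :: ls) = (l :: pre) :: chunk rest := by rw [chunk]
    have hlen : ((l :: ls).length : Int) = (rest.length : Int) + (1 + pre.length) := by
      have h : ls.length = pre.length + rest.length := by rw [← hsplit]; simp
      simp [h]
      ring
    cases hr : rest with
    | nil =>
      have hls : pre = ls := by rw [← hsplit, hr, List.append_nil]
      rw [alt_def, hchunk, hr,
        show chunk ([] : List String) = [] from by rw [chunk]]
      unfold boundsOf
      rw [hstarts, hr, PySem.List.enumerate_nil, List.filter_nil, List.map_nil, List.nil_append]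
      have hpos : (0:Int) < ((l :: ls).length : Int) := by simp
      simp only [List.zip_cons_cons, List.tail_cons, List.zip_nil_right, List.filterMap_cons,
        sliceF, if_pos hpos, List.filterMap_nil]
      rw [PySem.List.slice_zero_start, PySem.List.slice_to]
      · simp [hls]
      · omega
    | cons r rs =>
      have hrid : PySem.Str.startswith r "id," = true := by
        have := dropWhile_head_false (hrest_def ▸ hr : ls.dropWhile notId = r :: rs)
        unfold notId at this
        simpa using this
      have hshift : ((PySem.List.enumerate rs ((1 + (pre.length : Int)) + 1)).filter gTest).map Prod.fst
          = (((PySem.List.enumerate rs 1).filter gTest).map Prod.fst).map (· + (1 + (pre.length : Int))) := by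
        rw [show (1 + (pre.length : Int)) + 1 = 1 + (1 + (pre.length : Int)) from by ring]
        exact filter_shift rs 1 (1 + (pre.length : Int)) le_rfl (by omega)
      have hstarts2 : startsOf (l :: ls)
          = (1 + (pre.length : Int)) :: (startsOf rest).map (· + (1 + (pre.length : Int))) := by
        rw [hstarts, hr, PySem.List.enumerate_cons, List.filter_cons,
          show gTest (1 + (pre.length : Int), r) = true from by
            unfold gTest
            rw [hrid, decide_eq_true (show (0:Int) < 1 + (pre.length : Int) by omega)]
            rfl,
          if_pos rfl, List.map_cons, hshift, starts_cons]
      have hbounds : boundsOf (l :: ls)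
          = 0 :: (boundsOf rest).map (· + (1 + (pre.length : Int))) := by
        unfold boundsOf
        rw [hstarts2]
        simp only [List.map_cons, List.map_append, List.cons_append, zero_add]
        rw [hlen]
        simp
      have hklen : ((l :: pre).length : Int) = 1 + (pre.length : Int) := by
        simp [List.length_cons]
        ring
      have hlp : l :: ls = (l :: pre) ++ rest := by rw [← hsplit, hr]; simp
      rw [alt_def, hchunk, hbounds]
      have hbrest : boundsOf rest = 0 :: (startsOf rest ++ [(rest.length : Int)]) := rfl
      set m : List Int := startsOf rest ++ [(rest.length : Int)] with hm_def
      rw [hbrest]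
      simp only [List.map_cons, List.tail_cons, List.zip_cons_cons]
      have hhead : sliceF (l :: ls) (0, 0 + (1 + (pre.length : Int))) = some (l :: pre) := by
        unfold sliceF
        rw [if_pos (by omega), PySem.List.slice_zero_start, PySem.List.slice_to]
        · rw [hlp, show ((0:Int) + (1 + (pre.length : Int))).toNat = (l :: pre).length from by
            simp
            omega,
            List.take_left]
        · omega
      rw [List.filterMap_cons_some hhead]
      congr 1
      rw [show ((0:Int) + (1 + (pre.length : Int))) :: List.map (· + (1 + (pre.length : Int))) m
            = List.map (· + (1 + (pre.length : Int))) (0 :: m) from by simp,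
        List.zip_map,
        List.filterMap_map, ← ih, alt_def, hbrest]
      simp only [List.tail_cons]
      apply List.filterMap_congr
      intro p hp
      have hmem := List.of_mem_zip (show (p.1, p.2) ∈ (0 :: m).zip m from hp)
      have hp1 : 0 ≤ p.1 := mem_bounds_nonneg rest p.1 (hbrest ▸ hmem.1)
      have hp2 : 0 ≤ p.2 := by
    -- p.2 ∈ m = tail of bounds
        refine mem_bounds_nonneg rest p.2 ?_
        rw [hbrest]
        exact List.mem_cons_of_mem _ hmem.2
      simp only [Function.comp, Prod.map]
      unfold sliceF
      by_cases hlt : p.1 < p.2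
      · rw [if_pos hlt, if_pos (by omega)]
        rw [hlp, ← hklen, slice_shift (l :: pre) rest p.1 p.2 hp1 hp2]
      · rw [if_neg hlt, if_neg (by omega)]

-- ===== VERDICT (by name: the statement is the Claim_ definition above) =====
theorem iter_game_lines_py_spec : Claim_equal_iter_game_lines_py := by
  intro lines _
  unfold Spec_iter_game_lines_py
  rw [a_eq_chunk, b_eq_chunk]
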